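-- pv_equiv track=rewrite | github.com/xyzPeter/adventofcode | 2024/12/day_12.py | find_sides
-- ===== SOURCE A (Python) =====
-- def find_sides(locs_edges):
--     """
--     Return the total length of sides, by only counting edges once
--     if they are adjacent.
--     locs_edges is a set containing tuples of (row, column, edge).
--     For example, (3, 2, "T") means row 3, column 2, Top edge.
--     """
--     total_sides = 0
--
--     while locs_edges:
--         r, c, edge = locs_edges.pop()
--         total_sides += 1
--         if edge == "T" or edge == "B":
--             # Look left and right for adjacent T/B edges and remove
--             # Look left first.
--             n_c = c - 1
--             while (r, n_c, edge) in locs_edges: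
--                 locs_edges.remove((r, n_c, edge))
--                 n_c -= 1
--
--             n_c = c + 1
--             while (r, n_c, edge) in locs_edges:
--                 locs_edges.remove((r, n_c, edge))
--                 n_c += 1
--
--         if edge == "L" or edge == "R":
--             # Look up and down for adjacent L/R edges and remove
--             # Look up first.
--             n_r = r - 1
--             while (n_r, c, edge) in locs_edges:
--                 locs_edges.remove((n_r, c, edge))
--                 n_r -= 1
--
--             n_r = r + 1
--             while (n_r, c, edge) in locs_edges:
--                 locs_edges.remove((n_r, c, edge))
--                 n_r += 1
--
--     return total_sides
-- ===== SOURCE B (Python) =====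
-- def find_sides(locs_edges):
--     """
--     Count maximal runs of adjacent same-type edges in one pass:
--     an edge starts a new side exactly when its predecessor
--     (left neighbour for T/B, upper neighbour for L/R) is absent.
--     Empties locs_edges before returning, like the original.
--     """
--     total_sides = 0
--     for (r, c, edge) in locs_edges:
--         if edge == "T" or edge == "B":
--             prev = (r, c - 1, edge)
--         elif edge == "L" or edge == "R":
--             prev = (r - 1, c, edge)
--         else:
--             prev = None
--         if prev is None or prev not in locs_edges:
--             total_sides += 1
--     locs_edges.clear()
--     return total_sides
-- ===== Notes on version B (the rewrite author's own statement) =====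
-- stated objective: alternative
-- what changed: A destructively pops an edge and walks two while-loops removing its whole adjacent run from the set; B makes a single non-destructive pass counting the edges whose predecessor (left neighbour for T/B, upper for L/R) is absent, i.e. the run heads, then clears the set to reproduce A's mutation.
import Mathlib
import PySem

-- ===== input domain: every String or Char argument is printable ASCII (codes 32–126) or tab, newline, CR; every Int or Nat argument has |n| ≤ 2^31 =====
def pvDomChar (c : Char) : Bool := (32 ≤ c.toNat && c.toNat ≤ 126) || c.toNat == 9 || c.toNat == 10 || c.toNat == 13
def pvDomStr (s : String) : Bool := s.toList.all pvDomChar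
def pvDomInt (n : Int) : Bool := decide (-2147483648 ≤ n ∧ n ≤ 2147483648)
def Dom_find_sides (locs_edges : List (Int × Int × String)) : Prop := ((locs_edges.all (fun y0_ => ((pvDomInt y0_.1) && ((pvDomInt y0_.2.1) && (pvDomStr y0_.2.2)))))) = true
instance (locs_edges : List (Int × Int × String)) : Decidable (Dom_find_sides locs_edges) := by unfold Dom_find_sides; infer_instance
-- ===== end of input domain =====

-- B replaces A's destructive pop-and-remove-adjacent-runs loops by one non-destructive
-- pass counting run heads (edges whose predecessor is absent); both programs' Python
-- versions empty the argument set — the equivalence proved here is about the return value.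

-- ===== PORT A =====
-- termination helper for `sweep` (cited by its decreasing_by)
theorem pv_erase_length_lt {a : Int × Int × String}
    {l : List (Int × Int × String)} (h : a ∈ l) :
    (l.erase a).length < l.length := by
  have := List.length_erase_add_one h
  omega

-- inner while-loop of A: repeatedly remove (step-advanced) tuples while present
def sweep (step : Int × Int × String → Int × Int × String)
    (s : List (Int × Int × String)) (t : Int × Int × String) :
    List (Int × Int × String) :=
  if h : t ∈ s then sweep step (s.erase t) (step t) else s
termination_by s.length
decreasing_by exact pv_erase_length_lt h

theorem sweep_sublist (step : Int × Int × String → Int × Int × String) :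
    ∀ (s : List (Int × Int × String)) (t : Int × Int × String),
      (sweep step s t).Sublist s := by
  intro s
  induction hn : s.length using Nat.strong_induction_on generalizing s with
  | _ n ih =>
    intro t
    rw [sweep]
    split
    · rename_i h
      have hlt : (s.erase t).length < n := by
        have := List.length_erase_of_mem h
        have := List.length_pos_of_mem h
        omega
      exact ((ih _ hlt _ rfl) (step t)).trans (List.erase_sublist)
    · exact List.Sublist.refl s

theorem sweep_length_le (step : Int × Int × String → Int × Int × String)
    (s : List (Int × Int × String)) (t : Int × Int × String) :
    (sweep step s t).length ≤ s.length :=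
  (sweep_sublist step s t).length_le

-- the body of A's outer while loop after the pop: the two direction sweeps
def popRun (r c : Int) (e : String) (rest : List (Int × Int × String)) :
    List (Int × Int × String) :=
  if e = "T" ∨ e = "B" then
    let a := sweep (fun t => (t.1, t.2.1 - 1, t.2.2)) rest (r, c - 1, e)
    sweep (fun t => (t.1, t.2.1 + 1, t.2.2)) a (r, c + 1, e)
  else if e = "L" ∨ e = "R" then
    let a := sweep (fun t => (t.1 - 1, t.2.1, t.2.2)) rest (r - 1, c, e)
    sweep (fun t => (t.1 + 1, t.2.1, t.2.2)) a (r + 1, c, e)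
  else rest

theorem popRun_length_le (r c : Int) (e : String)
    (rest : List (Int × Int × String)) :
    (popRun r c e rest).length ≤ rest.length := by
  unfold popRun
  split
  · exact (sweep_length_le _ _ _).trans (sweep_length_le _ _ _)
  · split
    · exact (sweep_length_le _ _ _).trans (sweep_length_le _ _ _)
    · exact Nat.le_refl _

def find_sides (locs_edges : List (Int × Int × String)) : Int :=
  match locs_edges with
  | [] => 0
  | (r, c, e) :: rest => 1 + find_sides (popRun r c e rest)
termination_by locs_edges.length
decreasing_by exact Nat.lt_succ_of_le (popRun_length_le _ _ _ _)

-- ===== PORT B =====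
-- predecessor of an edge tuple in B's sense (left neighbour for T/B, upper for L/R)
def predOf (t : Int × Int × String) : Option (Int × Int × String) :=
  if t.2.2 = "T" ∨ t.2.2 = "B" then some (t.1, t.2.1 - 1, t.2.2)
  else if t.2.2 = "L" ∨ t.2.2 = "R" then some (t.1 - 1, t.2.1, t.2.2)
  else none

def find_sides_alt (locs_edges : List (Int × Int × String)) : Int :=
  locs_edges.foldl (fun acc t =>
    match predOf t with
    | none => acc + 1
    | some p => if p ∈ locs_edges then acc else acc + 1) 0

-- ===== PRECONDITION & SPEC =====
-- the Python parameter is a set, so its List encoding holds distinct elements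
def Pre_find_sides (locs_edges : List (Int × Int × String)) : Prop :=
  locs_edges.Nodup
instance (locs_edges : List (Int × Int × String)) : Decidable (Pre_find_sides locs_edges) := by
  unfold Pre_find_sides; infer_instance

def pvWitness_find_sides : (List (Int × Int × String)) :=
  [(0, 0, "T"), (0, 1, "T"), (1, 0, "L")]

def Spec_find_sides (locs_edges : List (Int × Int × String)) (out : Int) : Prop := out = find_sides_alt locs_edges
instance (locs_edges : List (Int × Int × String)) (out : Int) : Decidable (Spec_find_sides locs_edges out) := by unfold Spec_find_sides; infer_instance

-- ===== CLAIM (what is proved, stated in full; the proofs are below) =====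
def Claim_equal_find_sides : Prop := ∀ (locs_edges : List (Int × Int × String)), Dom_find_sides locs_edges → Pre_find_sides locs_edges → Spec_find_sides locs_edges (find_sides locs_edges)

-- ===== LEMMAS AND PROOFS =====

-- successor of an edge tuple (inverse of predOf on T/B/L/R edges)
def succOf (t : Int × Int × String) : Option (Int × Int × String) :=
  if t.2.2 = "T" ∨ t.2.2 = "B" then some (t.1, t.2.1 + 1, t.2.2)
  else if t.2.2 = "L" ∨ t.2.2 = "R" then some (t.1 + 1, t.2.1, t.2.2)
  else none

-- indicator: t is a run head with respect to universe `univ`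
def ind (univ : List (Int × Int × String)) (t : Int × Int × String) : Int :=
  match predOf t with
  | none => 1
  | some p => if p ∈ univ then 0 else 1

def cnt (univ s : List (Int × Int × String)) : Int := (s.map (ind univ)).sum

theorem pred_eq_iff (y t : Int × Int × String) :
    predOf y = some t ↔ succOf t = some y := by
  obtain ⟨yr, yc, ye⟩ := y
  obtain ⟨tr, tc, te⟩ := t
  simp only [predOf, succOf]
  constructor <;> intro h <;>
    (split at h <;> [skip; (split at h <;> [skip; simp at h])]) <;>
    simp_all [Prod.ext_iff] <;> omega


theorem f_step_eq (l : List (Int × Int × String)) (acc : Int) (t : Int × Int × String) :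
    (match predOf t with
      | none => acc + 1
      | some p => if p ∈ l then acc else acc + 1) = acc + ind l t := by
  unfold ind
  cases predOf t with
  | none => rfl
  | some p => by_cases h : p ∈ l <;> simp [h]

theorem alt_eq_cnt (l : List (Int × Int × String)) :
    find_sides_alt l = cnt l l := by
  have aux : ∀ (s : List (Int × Int × String)) (acc : Int),
      s.foldl (fun acc t =>
        match predOf t with
        | none => acc + 1
        | some p => if p ∈ l then acc else acc + 1) acc = acc + cnt l s := by
    intro s
    induction s with
    | nil => intro acc; simp [cnt]
    | cons x s ih =>
      intro acc
      rw [List.foldl_cons, f_step_eq, ih]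
      simp [cnt]
      ring
  have := aux l 0
  simpa [find_sides_alt] using this

theorem sum_map_add (l : List (Int × Int × String))
    (f g : (Int × Int × String) → Int) :
    (l.map (fun y => f y + g y)).sum = (l.map f).sum + (l.map g).sum := by
  induction l with
  | nil => simp
  | cons x l ih => simp [ih]; ring

theorem sum_indicator_single (l : List (Int × Int × String))
    (u : Int × Int × String) (h : l.Nodup) :
    (l.map (fun y => if y = u then (1 : Int) else 0)).sum
      = if u ∈ l then 1 else 0 := by
  induction l with
  | nil => simp
  | cons x l ih =>
    obtain ⟨hx, hl⟩ := List.nodup_cons.mp h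
    by_cases hxu : x = u
    · subst hxu
      have hz : ∀ y ∈ l, (if y = x then (1 : Int) else 0) = 0 :=
        fun y hy => if_neg (fun e => hx (by rw [← e]; exact hy))
      have : (l.map (fun y => if y = x then (1 : Int) else 0)).sum = 0 := by
        rw [show l.map (fun y => if y = x then (1 : Int) else 0)
              = l.map (fun _ => (0 : Int)) from List.map_congr_left hz]
        simp
      simp [this]
    · simp [hxu, ih hl, Ne.symm hxu]

theorem count_erase (s : List (Int × Int × String)) (t : Int × Int × String)
    (h : s.Nodup) (ht : t ∈ s) :
    cnt (s.erase t) (s.erase t)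
      = cnt s s - ind s t +
        (match succOf t with
          | some u => if u ∈ s.erase t then (1 : Int) else 0
          | none => 0) := by
  have hperm : s.Perm (t :: s.erase t) := List.perm_cons_erase ht
  have h1 : cnt s s = ind s t + cnt s (s.erase t) := by
    have : cnt s s = cnt s (t :: s.erase t) := by
      unfold cnt; exact (hperm.map (ind s)).sum_eq
    simpa [cnt] using this
  have hnderase : (s.erase t).Nodup := h.erase t
  have hpt : ∀ y ∈ s.erase t,
      ind (s.erase t) y = ind s y + (if predOf y = some t then (1 : Int) else 0) := by
    intro y _
    cases hp : predOf y with
    | none => simp [ind, hp]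
    | some p =>
      by_cases hpe : p = t
      · subst hpe
        have hmem : p ∉ s.erase p := by
          intro hc; exact absurd ((List.Nodup.mem_erase_iff h).mp hc).1 (by simp)
        simp [ind, hp, hmem, ht]
      · have hiff : p ∈ s.erase t ↔ p ∈ s := by
          rw [List.Nodup.mem_erase_iff h]; simp [hpe]
        simp [ind, hp, hpe, hiff]
  have h2 : cnt (s.erase t) (s.erase t)
      = cnt s (s.erase t) +
        ((s.erase t).map (fun y => if predOf y = some t then (1 : Int) else 0)).sum := by
    unfold cnt
    rw [List.map_congr_left hpt, sum_map_add]
  have h3 : ((s.erase t).map (fun y => if predOf y = some t then (1 : Int) else 0)).sum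
      = (match succOf t with
          | some u => if u ∈ s.erase t then (1 : Int) else 0
          | none => 0) := by
    cases hs : succOf t with
    | none =>
      have hz : ∀ y ∈ s.erase t, (if predOf y = some t then (1 : Int) else 0) = 0 := by
        intro y _
        have hne : predOf y ≠ some t := by
          intro hc
          have h' := (pred_eq_iff y t).mp hc
          rw [hs] at h'
          simp at h'
        simp [hne]
      rw [show (s.erase t).map (fun y => if predOf y = some t then (1 : Int) else 0)
            = (s.erase t).map (fun _ => (0 : Int)) from List.map_congr_left hz]
      simp
    | some u =>
      have hz : ∀ y ∈ s.erase t,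
          (if predOf y = some t then (1 : Int) else 0)
            = (if y = u then (1 : Int) else 0) := by
        intro y _
        have hiff : (predOf y = some t) ↔ (y = u) := by
          constructor
          · intro hc
            have h' := (pred_eq_iff y t).mp hc
            rw [hs] at h'
            exact (Option.some.inj h').symm
          · intro hc
            subst hc
            exact (pred_eq_iff y t).mpr hs
        simp only [hiff]
      rw [show (s.erase t).map (fun y => if predOf y = some t then (1 : Int) else 0)
            = (s.erase t).map (fun y => if y = u then (1 : Int) else 0)
            from List.map_congr_left hz]
      exact sum_indicator_single _ u hnderase
  rw [h2, h3, h1]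
  ring

theorem sweep_mem_gt (step : Int × Int × String → Int × Int × String)
    (μ : Int × Int × String → Int) (hμ : ∀ z, μ (step z) < μ z) :
    ∀ (s : List (Int × Int × String)) (t y : Int × Int × String),
      y ∈ s → μ t < μ y → y ∈ sweep step s t := by
  intro s
  induction hn : s.length using Nat.strong_induction_on generalizing s with
  | _ n ih =>
    intro t y hy hlt
    rw [sweep]
    split
    · rename_i h
      have hne : y ≠ t := fun e => by subst e; omega
      have hylt : (s.erase t).length < n := by
        have := List.length_erase_of_mem h
        have := List.length_pos_of_mem h
        omega
      exact ih _ hylt _ rfl _ y ((List.mem_erase_of_ne hne).mpr hy)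
        (lt_trans (hμ t) hlt)
    · exact hy

theorem sweep_cnt_pred (step co : Int × Int × String → Int × Int × String)
    (G : Int × Int × String → Prop)
    (hG : ∀ z, G z → G (step z))
    (hpred : ∀ z, G z → predOf z = some (step z))
    (hsucc : ∀ z, G z → succOf z = some (co z))
    (hco : ∀ z, G z → co (step z) = z)
    (hne : ∀ z, G z → step z ≠ z) :
    ∀ (s : List (Int × Int × String)) (t : Int × Int × String),
      s.Nodup → G t → co t ∉ s →
      cnt (sweep step s t) (sweep step s t)
        = cnt s s - (if t ∈ s then 1 else 0) := by
  intro s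
  induction hn : s.length using Nat.strong_induction_on generalizing s with
  | _ n ih =>
    intro t hnd hGt hcot
    rw [sweep]
    split
    · rename_i h
      have hlen : (s.erase t).length < n := by
        have := List.length_erase_of_mem h
        have := List.length_pos_of_mem h
        omega
      have hnd' : (s.erase t).Nodup := hnd.erase t
      have hcot' : co (step t) ∉ s.erase t := by
        rw [hco t hGt]
        intro hc; exact absurd ((List.Nodup.mem_erase_iff hnd).mp hc).1 (by simp)
      have hIH := ih _ hlen _ rfl (step t) hnd' (hG t hGt) hcot'
      have hce := count_erase s t hnd h
      have hind : ind s t = if step t ∈ s then 0 else 1 := by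
        unfold ind; rw [hpred t hGt]
      have hsuccm : (match succOf t with
          | some u => if u ∈ s.erase t then (1 : Int) else 0
          | none => 0) = 0 := by
        rw [hsucc t hGt]
        have : co t ∉ s.erase t := fun hc => hcot (List.mem_of_mem_erase hc)
        simp [this]
      have hmem : step t ∈ s.erase t ↔ step t ∈ s := by
        rw [List.Nodup.mem_erase_iff hnd]; simp [hne t hGt]
      rw [hIH, hce, hind, hsuccm]
      by_cases h1 : step t ∈ s
      · rw [if_pos h1, if_pos (hmem.mpr h1)]; ring
      · rw [if_neg h1, if_neg (fun hc => h1 (hmem.mp hc))]; ring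
    · rename_i h
      simp [h]

theorem sweep_cnt_succ (step co : Int × Int × String → Int × Int × String)
    (G : Int × Int × String → Prop)
    (hG : ∀ z, G z → G (step z))
    (hsucc : ∀ z, G z → succOf z = some (step z))
    (hpred : ∀ z, G z → predOf z = some (co z))
    (hco : ∀ z, G z → co (step z) = z) :
    ∀ (s : List (Int × Int × String)) (t : Int × Int × String),
      s.Nodup → G t → co t ∉ s →
      cnt (sweep step s t) (sweep step s t)
        = cnt s s - (if t ∈ s then 1 else 0) := by
  intro s
  induction hn : s.length using Nat.strong_induction_on generalizing s with
  | _ n ih =>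
    intro t hnd hGt hcot
    rw [sweep]
    split
    · rename_i h
      have hlen : (s.erase t).length < n := by
        have := List.length_erase_of_mem h
        have := List.length_pos_of_mem h
        omega
      have hnd' : (s.erase t).Nodup := hnd.erase t
      have hcot' : co (step t) ∉ s.erase t := by
        rw [hco t hGt]
        intro hc; exact absurd ((List.Nodup.mem_erase_iff hnd).mp hc).1 (by simp)
      have hIH := ih _ hlen _ rfl (step t) hnd' (hG t hGt) hcot'
      have hce := count_erase s t hnd h
      have hind : ind s t = 1 := by
        unfold ind; rw [hpred t hGt]; simp [hcot]
      have hsuccm : (match succOf t with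
          | some u => if u ∈ s.erase t then (1 : Int) else 0
          | none => 0) = if step t ∈ s.erase t then (1 : Int) else 0 := by
        rw [hsucc t hGt]
      rw [hIH, hce, hind, hsuccm]
      by_cases h1 : step t ∈ s.erase t <;> simp [h1, h] <;> omega
    · rename_i h
      simp [h]

theorem popRun_sublist (r c : Int) (e : String)
    (rest : List (Int × Int × String)) :
    (popRun r c e rest).Sublist rest := by
  unfold popRun
  split
  · exact (sweep_sublist _ _ _).trans (sweep_sublist _ _ _)
  · split
    · exact (sweep_sublist _ _ _).trans (sweep_sublist _ _ _)
    · exact List.Sublist.refl _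

theorem cnt_pop_generic (stepL stepR : Int × Int × String → Int × Int × String)
    (G : Int × Int × String → Prop)
    (hG : ∀ z, G z → G (stepL z)) (hG' : ∀ z, G z → G (stepR z))
    (hpred : ∀ z, G z → predOf z = some (stepL z))
    (hsucc : ∀ z, G z → succOf z = some (stepR z))
    (hco : ∀ z, G z → stepR (stepL z) = z)
    (hco' : ∀ z, G z → stepL (stepR z) = z)
    (hne : ∀ z, G z → stepL z ≠ z)
    (μ : Int × Int × String → Int) (hμ : ∀ z, μ (stepL z) < μ z)
    (x : Int × Int × String) (hGx : G x) (hμx : μ (stepL x) < μ (stepR x))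
    (rest : List (Int × Int × String)) (hnd : rest.Nodup) (hx : x ∉ rest) :
    cnt (sweep stepR (sweep stepL rest (stepL x)) (stepR x))
        (sweep stepR (sweep stepL rest (stepL x)) (stepR x))
      = cnt (x :: rest) (x :: rest) - 1 := by
  have hnds : (x :: rest).Nodup := List.nodup_cons.mpr ⟨hx, hnd⟩
  have hce := count_erase (x :: rest) x hnds (List.mem_cons_self)
  rw [List.erase_cons_head] at hce
  have hmx : stepL x ∈ x :: rest ↔ stepL x ∈ rest := by
    simp [List.mem_cons, hne x hGx]
  have hindx : ind (x :: rest) x = if stepL x ∈ rest then 0 else 1 := by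
    unfold ind
    rw [hpred x hGx]
    show (if stepL x ∈ x :: rest then (0 : Int) else 1) = if stepL x ∈ rest then 0 else 1
    by_cases hm : stepL x ∈ rest
    · rw [if_pos (hmx.mpr hm), if_pos hm]
    · rw [if_neg (fun hc => hm (hmx.mp hc)), if_neg hm]
  have hM : (match succOf x with
      | some u => if u ∈ rest then (1 : Int) else 0
      | none => 0) = if stepR x ∈ rest then (1 : Int) else 0 := by
    rw [hsucc x hGx]
  rw [hindx, hM] at hce
  have hsub1 := sweep_sublist stepL rest (stepL x)
  have hnd1 : (sweep stepL rest (stepL x)).Nodup := hnd.sublist hsub1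
  have hL := sweep_cnt_pred stepL stepR G hG hpred hsucc hco hne rest (stepL x)
    hnd (hG x hGx) (by rw [hco x hGx]; exact hx)
  have hum : stepR x ∈ sweep stepL rest (stepL x) ↔ stepR x ∈ rest :=
    ⟨fun h => hsub1.subset h,
     fun h => sweep_mem_gt stepL μ hμ rest (stepL x) (stepR x) h hμx⟩
  have hR := sweep_cnt_succ stepR stepL G hG' hsucc hpred hco'
    (sweep stepL rest (stepL x)) (stepR x) hnd1 (hG' x hGx)
    (by rw [hco' x hGx]; exact fun hc => hx (hsub1.subset hc))
  by_cases h1 : stepL x ∈ rest <;> by_cases h2 : stepR x ∈ rest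
  · rw [if_pos h1, if_pos h2] at hce
    rw [if_pos h1] at hL
    rw [if_pos (hum.mpr h2)] at hR
    linarith
  · rw [if_pos h1, if_neg h2] at hce
    rw [if_pos h1] at hL
    rw [if_neg (fun hc => h2 (hum.mp hc))] at hR
    linarith
  · rw [if_neg h1, if_pos h2] at hce
    rw [if_neg h1] at hL
    rw [if_pos (hum.mpr h2)] at hR
    linarith
  · rw [if_neg h1, if_neg h2] at hce
    rw [if_neg h1] at hL
    rw [if_neg (fun hc => h2 (hum.mp hc))] at hR
    linarith

theorem cnt_popRun (r c : Int) (e : String)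
    (rest : List (Int × Int × String)) (hnd : rest.Nodup)
    (hx : ((r, c, e) : Int × Int × String) ∉ rest) :
    cnt (popRun r c e rest) (popRun r c e rest)
      = cnt ((r, c, e) :: rest) ((r, c, e) :: rest) - 1 := by
  by_cases hTB : e = "T" ∨ e = "B"
  · have h := cnt_pop_generic
      (fun t => (t.1, t.2.1 - 1, t.2.2)) (fun t => (t.1, t.2.1 + 1, t.2.2))
      (fun z => z.2.2 = "T" ∨ z.2.2 = "B")
      (fun z hz => hz) (fun z hz => hz)
      (fun z hz => by unfold predOf; rw [if_pos hz])
      (fun z hz => by unfold succOf; rw [if_pos hz])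
      (fun z _ => by obtain ⟨a, b, d⟩ := z; simp)
      (fun z _ => by obtain ⟨a, b, d⟩ := z; simp)
      (fun z _ => by obtain ⟨a, b, d⟩ := z; simp)
      (fun z => z.2.1) (fun z => by show z.2.1 - 1 < z.2.1; omega)
      (r, c, e) hTB (by show c - 1 < c + 1; omega)
      rest hnd hx
    unfold popRun
    rw [if_pos hTB]
    exact h
  · by_cases hLR : e = "L" ∨ e = "R"
    · have h := cnt_pop_generic
        (fun t => (t.1 - 1, t.2.1, t.2.2)) (fun t => (t.1 + 1, t.2.1, t.2.2))
        (fun z => z.2.2 = "L" ∨ z.2.2 = "R")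
        (fun z hz => hz) (fun z hz => hz)
        (fun z hz => by
          unfold predOf
          have hzT : ¬(z.2.2 = "T" ∨ z.2.2 = "B") := by
            rcases hz with hz | hz <;> rw [hz] <;> simp
          rw [if_neg hzT, if_pos hz])
        (fun z hz => by
          unfold succOf
          have hzT : ¬(z.2.2 = "T" ∨ z.2.2 = "B") := by
            rcases hz with hz | hz <;> rw [hz] <;> simp
          rw [if_neg hzT, if_pos hz])
        (fun z _ => by obtain ⟨a, b, d⟩ := z; simp)
        (fun z _ => by obtain ⟨a, b, d⟩ := z; simp)
        (fun z _ => by obtain ⟨a, b, d⟩ := z; simp)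
        (fun z => z.1) (fun z => by show z.1 - 1 < z.1; omega)
        (r, c, e) hLR (by show r - 1 < r + 1; omega)
        rest hnd hx
      unfold popRun
      rw [if_neg hTB, if_pos hLR]
      exact h
    · have hpx : predOf (r, c, e) = none := by
        unfold predOf; rw [if_neg hTB, if_neg hLR]
      have hsx : succOf (r, c, e) = none := by
        unfold succOf; rw [if_neg hTB, if_neg hLR]
      have hce := count_erase ((r, c, e) :: rest) (r, c, e)
        (List.nodup_cons.mpr ⟨hx, hnd⟩) (List.mem_cons_self)
      rw [List.erase_cons_head] at hce
      have hind : ind ((r, c, e) :: rest) (r, c, e) = 1 := by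
        unfold ind; rw [hpx]
      rw [hind, hsx] at hce
      unfold popRun
      rw [if_neg hTB, if_neg hLR]
      linarith

theorem find_sides_eq_cnt :
    ∀ (s : List (Int × Int × String)), s.Nodup → find_sides s = cnt s s := by
  intro s
  induction hn : s.length using Nat.strong_induction_on generalizing s with
  | _ n ih =>
    intro hnd
    cases s with
    | nil => simp [find_sides, cnt]
    | cons x rest =>
      obtain ⟨r, c, e⟩ := x
      obtain ⟨hx, hnd'⟩ := List.nodup_cons.mp hnd
      rw [show find_sides ((r, c, e) :: rest) = 1 + find_sides (popRun r c e rest)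
            from by rw [find_sides]]
      have hsub := popRun_sublist r c e rest
      have hlen : (popRun r c e rest).length < n := by
        have h1 := popRun_length_le r c e rest
        simp only [List.length_cons] at hn
        omega
      rw [ih _ hlen _ rfl (hnd'.sublist hsub), cnt_popRun r c e rest hnd' hx]
      ring

theorem find_sides_spec : Claim_equal_find_sides := by
  intro l _hDom hpre
  unfold Spec_find_sides
  unfold Pre_find_sides at hpre
  rw [find_sides_eq_cnt l hpre, alt_eq_cnt]
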